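-- pv_equiv track=rewrite | github.com/amillionhornets/Java | DS Sem 1/Homework_7/Clark116.py | findBlueTiles
-- ===== SOURCE A (Python) =====
-- def findBlueTiles(greyTiles, patterns, curr):
--     if checkTilesBlue(greyTiles) and greyTiles not in patterns:
--         patterns.append(greyTiles[:])
--     if curr >= len(greyTiles):
--         return patterns
--     if curr + 3 < len(greyTiles) and greyTiles[curr] == 0 and greyTiles[curr + 1] == 0 and greyTiles[curr + 2] == 0 and greyTiles[curr + 3] == 0:
--         greyTiles[curr] = 1
--         greyTiles[curr + 1] = 1
--         greyTiles[curr + 2] = 1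
--         greyTiles[curr + 3] = 1
--         findBlueTiles(greyTiles, patterns, curr + 4)
--
--         greyTiles[curr] = 0
--         greyTiles[curr + 1] = 0
--         greyTiles[curr + 2] = 0
--         greyTiles[curr + 3] = 0
--     findBlueTiles(greyTiles, patterns, curr+1)
--     return patterns
--
-- def checkTilesBlue(greyTiles):
--     blueCount = 0
--     for i in range(len(greyTiles) - 3):
--         if(greyTiles[i] == 1 and greyTiles[i + 1] == 1 and greyTiles[i + 2] == 1 and greyTiles[i + 3] == 1):
--             blueCount+=1
--     return(blueCount >= 1)
-- ===== SOURCE B (Python) =====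
-- def hasBlueWindow(tiles):
--     # single pass: track the length of the current run of 1s; a window of four
--     # consecutive blue tiles exists iff some run reaches length 4
--     run = 0
--     for x in tiles:
--         run = run + 1 if x == 1 else 0
--         if run >= 4:
--             return True
--     return False
--
-- def findBlueTiles(greyTiles, patterns, curr):
--     # Iterative DFS over an explicit stack of (tiles, curr) states; each frame
--     # owns its own copy of the tile row, so greyTiles is never mutated.
--     stack = [(list(greyTiles), curr)]
--     while stack:
--         tiles, c = stack.pop()
--         if hasBlueWindow(tiles) and tiles not in patterns:
--             patterns.append(list(tiles))
--         if c < len(tiles):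
--             # skip state below, placement state on top of the stack, so the
--             # placement branch is explored first (the recursion's order)
--             stack.append((tiles, c + 1))
--             if c + 3 < len(tiles) and all(tiles[c + j] == 0 for j in range(4)):
--                 placed = list(tiles)
--                 for j in range(4):
--                     placed[c + j] = 1
--                 stack.append((placed, c + 4))
--     return patterns
-- ===== Notes on version B (the rewrite author's own statement) =====
-- stated objective: alternative
-- what changed: The recursive mutate-and-restore backtracking is replaced by an iterative depth-first search over an explicit stack of per-frame (tiles, curr) copies (skip state pushed below the placement state to keep discovery order), the window-counting helper checkTilesBlue is replaced by a single-pass run-of-ones counter hasBlueWindow with early exit, and the four-cell guard/write become a range(4) comprehension and loop.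
import Mathlib
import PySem

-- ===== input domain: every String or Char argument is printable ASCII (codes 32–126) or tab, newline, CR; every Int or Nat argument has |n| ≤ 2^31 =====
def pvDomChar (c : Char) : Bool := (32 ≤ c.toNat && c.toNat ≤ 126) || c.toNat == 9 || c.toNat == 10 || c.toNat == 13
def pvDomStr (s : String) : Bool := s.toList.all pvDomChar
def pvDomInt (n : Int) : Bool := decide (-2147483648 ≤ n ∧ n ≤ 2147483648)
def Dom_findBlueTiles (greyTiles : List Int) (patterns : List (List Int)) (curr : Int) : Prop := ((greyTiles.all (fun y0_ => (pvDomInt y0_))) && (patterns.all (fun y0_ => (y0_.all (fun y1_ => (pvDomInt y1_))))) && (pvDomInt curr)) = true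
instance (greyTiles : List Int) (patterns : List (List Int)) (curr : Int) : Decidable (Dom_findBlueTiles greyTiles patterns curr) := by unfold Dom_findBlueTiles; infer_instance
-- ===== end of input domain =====

-- B replaces A's recursive mutate-and-restore backtracking by an iterative DFS over an
-- explicit stack of per-frame (tiles, curr) copies, with a single-pass run-of-ones scan
-- instead of the counting loop and a range(4) loop for the four-cell guard/write; the skip state is
-- pushed below the placement state so the discovery order of patterns is unchanged.
-- (In Python both A and B append to `patterns` in place and leave `greyTiles` net-unchanged;
-- the proof is about the returned value.)


-- ===== PORT A =====
-- checkTilesBlue: counting loop over range(len(greyTiles) - 3); every index the loop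
-- reads is in range, so pyGetD (with an arbitrary default) is exact here.
def checkTilesBlue (greyTiles : List Int) : Bool :=
  let blueCount : Int := (PySem.List.pyRange 0 ((greyTiles.length : Int) - 3) 1).foldl
    (fun bc i =>
      if PySem.List.pyGetD greyTiles i 2 == 1 && PySem.List.pyGetD greyTiles (i+1) 2 == 1 &&
         PySem.List.pyGetD greyTiles (i+2) 2 == 1 && PySem.List.pyGetD greyTiles (i+3) 2 == 1
      then bc + 1 else bc) 0
  blueCount ≥ 1

-- the four assignments greyTiles[curr..curr+3] = v (pySetD is exact on in-range indices;
-- both programs only reach it after the guard has read the same four indices)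
def setBlock (t : List Int) (c v : Int) : List Int :=
  PySem.List.pySetD (PySem.List.pySetD (PySem.List.pySetD (PySem.List.pySetD t c v) (c+1) v) (c+2) v) (c+3) v

-- A's block-placement guard; pyGetD's default 2 makes the reads total: on an index Python
-- would raise on, the comparison with 0 is false and the branch is not taken (such inputs
-- are excluded by Pre_findBlueTiles).
def placeCond (t : List Int) (c : Int) : Bool :=
  decide (c + 3 < (t.length : Int)) && PySem.List.pyGetD t c 2 == 0 && PySem.List.pyGetD t (c+1) 2 == 0 &&
  PySem.List.pyGetD t (c+2) 2 == 0 && PySem.List.pyGetD t (c+3) 2 == 0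

-- A threads the mutated greyTiles and the growing patterns through the recursion; the
-- port threads the pair (tiles, patterns) explicitly.  The Nat fuel only makes the same
-- recursion structural; findBlueTiles supplies enough fuel for every input.
def goA : Nat → List Int → List (List Int) → Int → List Int × List (List Int)
  | 0, tiles, patterns, _ => (tiles, patterns)
  | fuel + 1, tiles, patterns, curr =>
    let patterns' := if checkTilesBlue tiles && !(patterns.contains tiles) then patterns ++ [tiles] else patterns
    if (tiles.length : Int) ≤ curr then (tiles, patterns')
    else if placeCond tiles curr then
      let r := goA fuel (setBlock tiles curr 1) patterns' (curr + 4)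
      goA fuel (setBlock r.1 curr 0) r.2 (curr + 1)
    else goA fuel tiles patterns' (curr + 1)

def findBlueTiles (greyTiles : List Int) (patterns : List (List Int)) (curr : Int) : List (List Int) :=
  (goA (((greyTiles.length : Int) - curr).toNat + 1) greyTiles patterns curr).2

-- ===== PORT B =====
-- B's helper hasBlueWindow: single pass with a run counter; the early `return True`
-- becomes the `if 4 ≤ r then true` branch of the structural recursion over the row.
def hasBlueWindowGo : Int → List Int → Bool
  | _, [] => false
  | run, x :: rest =>
    let r : Int := if x == 1 then run + 1 else 0
    if 4 ≤ r then true else hasBlueWindowGo r rest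

def hasBlueWindow (tiles : List Int) : Bool := hasBlueWindowGo 0 tiles

-- Source B's guard `c + 3 < len(tiles) and all(tiles[c+j] == 0 for j in range(4))`
def allZeroBlock (t : List Int) (c : Int) : Bool :=
  decide (c + 3 < (t.length : Int)) &&
  (PySem.List.pyRange 0 4 1).all (fun j => PySem.List.pyGetD t (c + j) 2 == 0)

-- Source B's `placed = list(tiles); for j in range(4): placed[c+j] = 1`
def paintBlock (t : List Int) (c : Int) : List Int :=
  (PySem.List.pyRange 0 4 1).foldl (fun u j => PySem.List.pySetD u (c + j) 1) t

-- the while loop over the explicit stack; the list's head is the top of the stack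
-- (Source B pushes the skip state, then the placement state, and pops the last pushed).
-- The Nat fuel only makes the loop structural; findBlueTiles_alt supplies enough fuel
-- for every input (an upper bound on the number of iterations).
def loopB : Nat → List (List Int × Int) → List (List Int) → List (List Int)
  | _, [], patterns => patterns
  | 0, _, patterns => patterns
  | fuel + 1, (tiles, c) :: rest, patterns =>
    let patterns' := if hasBlueWindow tiles && !(patterns.contains tiles) then patterns ++ [tiles] else patterns
    if c < (tiles.length : Int) then
      if allZeroBlock tiles c then
        loopB fuel ((paintBlock tiles c, c + 4) :: (tiles, c + 1) :: rest) patterns'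
      else
        loopB fuel ((tiles, c + 1) :: rest) patterns'
    else loopB fuel rest patterns'

def findBlueTiles_alt (greyTiles : List Int) (patterns : List (List Int)) (curr : Int) : List (List Int) :=
  loopB (2 ^ ((((greyTiles.length : Int) - curr).toNat) + 1) + 1) [(greyTiles, curr)] patterns

-- ===== PRECONDITION & SPEC =====
-- Pre_ excludes exactly the inputs on which A raises IndexError: some step of the march
-- from curr reads greyTiles[c] with c below -len while the guard c+3 < len holds, which
-- happens precisely when curr < -len and curr < len - 3.
def Pre_findBlueTiles (greyTiles : List Int) (_patterns : List (List Int)) (curr : Int) : Prop :=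
  -(greyTiles.length : Int) ≤ curr ∨ (greyTiles.length : Int) - 3 ≤ curr
instance (greyTiles : List Int) (patterns : List (List Int)) (curr : Int) : Decidable (Pre_findBlueTiles greyTiles patterns curr) := by unfold Pre_findBlueTiles; infer_instance
def pvWitness_findBlueTiles : List Int × List (List Int) × Int := ([0, 0, 0, 0, 0], [], 0)
def Spec_findBlueTiles (greyTiles : List Int) (patterns : List (List Int)) (curr : Int) (out : List (List Int)) : Prop := out = findBlueTiles_alt greyTiles patterns curr
instance (greyTiles : List Int) (patterns : List (List Int)) (curr : Int) (out : List (List Int)) : Decidable (Spec_findBlueTiles greyTiles patterns curr out) := by unfold Spec_findBlueTiles; infer_instance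

-- ===== CLAIM =====
def Claim_equal_findBlueTiles : Prop := ∀ (greyTiles : List Int) (patterns : List (List Int)) (curr : Int), Dom_findBlueTiles greyTiles patterns curr → Pre_findBlueTiles greyTiles patterns curr → Spec_findBlueTiles greyTiles patterns curr (findBlueTiles greyTiles patterns curr)

-- ===== LEMMAS AND PROOFS =====

-- ---- B's helpers denote A's helpers ----

theorem pyGetD_cons_succ (a : Int) (t : List Int) (i d : Int) (h : 0 ≤ i) :
    PySem.List.pyGetD (a :: t) (i + 1) d = PySem.List.pyGetD t i d := by
  obtain ⟨k, rfl⟩ : ∃ k : Nat, i = (k : Int) := ⟨i.toNat, by omega⟩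
  have : ((k : Int) + 1) = ((k + 1 : Nat) : Int) := by push_cast; ring
  rw [this, PySem.List.pyGetD_natCast, PySem.List.pyGetD_natCast]
  simp [List.getD]

-- the count-based loop is positive iff some element satisfies the window predicate
theorem count_pos (p : Int → Bool) : ∀ (l : List Int) (b : Int), 0 ≤ b →
    ((l.foldl (fun bc i => if p i then bc + 1 else bc) b) ≥ 1 ↔ 1 ≤ b ∨ ∃ i ∈ l, p i = true) := by
  intro l
  induction l with
  | nil => intro b hb; simp
  | cons x l ih =>
    intro b hb
    simp only [List.foldl_cons, List.mem_cons]
    by_cases hx : p x = true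
    · rw [if_pos hx]
      rw [ih (b + 1) (by omega)]
      constructor
      · intro _; right; exact ⟨x, Or.inl rfl, hx⟩
      · intro _; left; omega
    · rw [if_neg hx, ih b hb]
      constructor
      · rintro (h | ⟨i, hi, hp⟩)
        · exact Or.inl h
        · exact Or.inr ⟨i, Or.inr hi, hp⟩
      · rintro (h | ⟨i, rfl | hi, hp⟩)
        · exact Or.inl h
        · exact absurd hp hx
        · exact Or.inr ⟨i, hi, hp⟩

-- A's window predicate at index i
def winP (t : List Int) (i : Int) : Bool :=
  PySem.List.pyGetD t i 2 == 1 && PySem.List.pyGetD t (i+1) 2 == 1 &&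
  PySem.List.pyGetD t (i+2) 2 == 1 && PySem.List.pyGetD t (i+3) 2 == 1

theorem winP_cons (a : Int) (t : List Int) (i : Int) (h : 0 ≤ i) :
    winP (a :: t) (i + 1) = winP t i := by
  unfold winP
  rw [show i + 1 + 1 = (i + 1) + 1 from rfl,
      show i + 1 + 2 = (i + 2) + 1 from by ring,
      show i + 1 + 3 = (i + 3) + 1 from by ring]
  rw [pyGetD_cons_succ a t i 2 h, pyGetD_cons_succ a t (i+1) 2 (by omega),
      pyGetD_cons_succ a t (i+2) 2 (by omega), pyGetD_cons_succ a t (i+3) 2 (by omega)]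

theorem winP_zero (a b c d : Int) (rest : List Int) :
    winP (a :: b :: c :: d :: rest) 0 = (a == 1 && b == 1 && c == 1 && d == 1) := by
  unfold winP
  rw [show (0:Int) + 1 = 1 from rfl, show (0:Int) + 2 = 2 from rfl, show (0:Int) + 3 = 3 from rfl]
  have g : ∀ (j : Int) (x : Int), PySem.List.pyGetD (a :: b :: c :: d :: rest) j 2 = x →
      (PySem.List.pyGetD (a :: b :: c :: d :: rest) j 2 == 1) = (x == 1) := by
    intro j x h; rw [h]
  rw [g 0 a ?_, g 1 b ?_, g 2 c ?_, g 3 d ?_] <;>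
    · simp [PySem.List.pyGetD, PySem.List.pyGet?, PySem.List.pyIdx?]
      rw [if_pos (by omega)]
      simp

-- the recursive sliding-window predicate both helpers are measured against
def win4 : List Int → Bool
  | a :: b :: c :: d :: rest => (a == 1 && b == 1 && c == 1 && d == 1) || win4 (b :: c :: d :: rest)
  | _ => false

-- 'the first m elements exist and are all 1'
def headOnes : Nat → List Int → Bool
  | 0, _ => true
  | _ + 1, [] => false
  | m + 1, x :: t => x == 1 && headOnes m t

theorem headOnes_mono : ∀ (t : List Int) (m m' : Nat), m' ≤ m → headOnes m t = true → headOnes m' t = true := by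
  intro t
  induction t with
  | nil =>
    intro m m' h hm
    cases m' with
    | zero => rfl
    | succ k => cases m with
      | zero => omega
      | succ l => exact absurd hm (by simp [headOnes])
  | cons x t ih =>
    intro m m' h hm
    cases m' with
    | zero => rfl
    | succ k =>
      cases m with
      | zero => omega
      | succ l =>
        simp only [headOnes, Bool.and_eq_true] at hm ⊢
        exact ⟨hm.1, ih l k (by omega) hm.2⟩

theorem headOnes_four_win4 : ∀ (t : List Int), headOnes 4 t = true → win4 t = true := by
  intro t h
  match t with
  | [] => simp [headOnes] at h
  | [a] => simp [headOnes] at h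
  | [a, b] => simp [headOnes] at h
  | [a, b, c] => simp [headOnes] at h
  | a :: b :: c :: d :: rest =>
    simp only [headOnes, Bool.and_eq_true, Bool.and_true] at h
    simp [win4, h.1, h.2.1, h.2.2.1, h.2.2.2]

theorem win4_cons (x : Int) (t : List Int) :
    win4 (x :: t) = ((x == 1 && headOnes 3 t) || win4 t) := by
  match t with
  | [] => simp [win4, headOnes]
  | [a] => simp [win4, headOnes]
  | [a, b] => simp [win4, headOnes]
  | a :: b :: c :: rest => simp [win4, headOnes, Bool.and_assoc]

theorem win4_cons4 (a b c d : Int) (rest : List Int) :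
    win4 (a :: b :: c :: d :: rest) = ((a == 1 && b == 1 && c == 1 && d == 1) || win4 (b :: c :: d :: rest)) := by
  simp [win4]

theorem go_char : ∀ (t : List Int) (k : Nat), k ≤ 3 →
    hasBlueWindowGo (k : Int) t = (headOnes (4 - k) t || win4 t) := by
  intro t
  induction t with
  | nil =>
    intro k hk
    have h : 4 - k = (3 - k) + 1 := by omega
    simp [hasBlueWindowGo, h, headOnes, win4]
  | cons x t ih =>
    intro k hk
    rw [hasBlueWindowGo, win4_cons]
    by_cases hx : (x == 1) = true
    · by_cases hk3 : k = 3
      · subst hk3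
        simp [hx, headOnes]
      · have hk' : k + 1 ≤ 3 := by omega
        have hcast : (k : Int) + 1 = ((k + 1 : Nat) : Int) := by push_cast; ring
        simp only [hx, if_true]
        rw [if_neg (by omega : ¬ (4 : Int) ≤ (k : Int) + 1), hcast, ih (k + 1) hk']
        have h4k : 4 - k = (3 - k) + 1 := by omega
        have h4k1 : 4 - (k + 1) = 3 - k := by omega
        rw [h4k, h4k1]
        simp only [headOnes, hx, Bool.true_and]
        cases hh : headOnes 3 t
        · simp
        · have := headOnes_mono t 3 (3 - k) (by omega) hh
          simp [this]
    · have hx' : (x == 1) = false := by simp_all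
      rw [hx']
      simp only [if_neg Bool.false_ne_true]
      rw [if_neg (by omega : ¬ (4 : Int) ≤ (0 : Int)),
          show (0 : Int) = ((0 : Nat) : Int) from rfl, ih 0 (by omega)]
      have h4k : 4 - k = (4 - k - 1) + 1 := by omega
      rw [h4k]
      simp only [headOnes, hx', Bool.false_and, Bool.false_or]
      cases hh : headOnes 4 t
      · simp
      · simp [headOnes_four_win4 t hh]

theorem hasBlueWindow_eq_win4 (t : List Int) : hasBlueWindow t = win4 t := by
  unfold hasBlueWindow
  rw [show (0 : Int) = ((0 : Nat) : Int) from rfl, go_char t 0 (by omega)]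
  cases hh : headOnes 4 t
  · simp
  · simp [headOnes_four_win4 t hh]

theorem exists_win_iff : ∀ (t : List Int),
    (∃ i : Int, 0 ≤ i ∧ i < (t.length : Int) - 3 ∧ winP t i = true) ↔ win4 t = true := by
  intro t
  induction t with
  | nil => simp [win4]; omega
  | cons a t ih =>
    match t, ih with
    | [], _ => simp [win4]; omega
    | [b], _ => simp [win4]; omega
    | [b, c], _ => simp [win4]; omega
    | b :: c :: d :: rest, ih =>
      rw [win4_cons4]
      constructor
      · rintro ⟨i, h0, hlt, hw⟩
        by_cases hi : i = 0
        · subst hi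
          rw [winP_zero] at hw
          simp [hw]
        · have h1 : 1 ≤ i := by omega
          obtain ⟨j, rfl⟩ : ∃ j, i = j + 1 := ⟨i - 1, by ring⟩
          have hwj : winP (b :: c :: d :: rest) j = true := by
            rw [← winP_cons a _ j (by omega)]; exact hw
          have hhw : win4 (b :: c :: d :: rest) = true := by
            rw [← ih]
            exact ⟨j, by omega, by simp at hlt ⊢; omega, hwj⟩
          simp [hhw]
      · intro h
        rcases Bool.or_eq_true_iff.mp h with hw | hw
        · refine ⟨0, le_refl 0, by simp; omega, ?_⟩
          rw [winP_zero]; exact hw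
        · obtain ⟨j, h0, hlt, hwj⟩ := ih.mpr hw
          refine ⟨j + 1, by omega, by simp at hlt ⊢; omega, ?_⟩
          rw [winP_cons a _ j h0]; exact hwj

theorem hasBlueWindow_eq : hasBlueWindow = checkTilesBlue := by
  funext t
  have key : ((PySem.List.pyRange 0 ((t.length : Int) - 3) 1).foldl
      (fun bc i => if winP t i then bc + 1 else bc) (0 : Int) ≥ 1) ↔ win4 t = true := by
    rw [count_pos (winP t) _ 0 (le_refl 0), ← exists_win_iff t]
    constructor
    · rintro (h | ⟨i, hi, hp⟩)
      · omega
      · obtain ⟨h0, hlt⟩ := PySem.List.mem_pyRange_one.mp hi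
        exact ⟨i, h0, hlt, hp⟩
    · rintro ⟨i, h0, hlt, hp⟩
      exact Or.inr ⟨i, PySem.List.mem_pyRange_one.mpr ⟨h0, hlt⟩, hp⟩
  show hasBlueWindow t = decide ((PySem.List.pyRange 0 ((t.length : Int) - 3) 1).foldl
      (fun bc i => if winP t i then bc + 1 else bc) (0 : Int) ≥ 1)
  rw [hasBlueWindow_eq_win4 t,
      show win4 t = decide (win4 t = true) from by cases win4 t <;> simp]
  rw [decide_eq_decide]
  exact key.symm

theorem pyRange_four : PySem.List.pyRange 0 4 1 = [0, 1, 2, 3] := by decide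

theorem allZeroBlock_eq : allZeroBlock = placeCond := by
  funext t c
  unfold allZeroBlock placeCond
  rw [pyRange_four]
  simp only [List.all_cons, List.all_nil, add_zero, Bool.and_true, Bool.and_assoc]

theorem paintBlock_eq (t : List Int) (c : Int) : paintBlock t c = setBlock t c 1 := by
  unfold paintBlock setBlock
  rw [pyRange_four]
  simp only [List.foldl_cons, List.foldl_nil, add_zero]

-- ---- A's recursion restores the row ----

-- the Nat index Python's i resolves to
def nidx (n : Nat) (i : Int) : Nat := if 0 ≤ i then i.toNat else n - (-i).toNat

theorem nidx_lt (n : Nat) (i : Int) (h1 : -(n : Int) ≤ i) (h2 : i < (n : Int)) : nidx n i < n := by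
  unfold nidx; split_ifs <;> omega

theorem pySetD_eq_set (t : List Int) (i v : Int) (h1 : -(t.length : Int) ≤ i) (h2 : i < (t.length : Int)) :
    PySem.List.pySetD t i v = t.set (nidx t.length i) v := by
  simp only [PySem.List.pySetD, PySem.List.pySet?, PySem.List.pyIdx?, nidx]
  split_ifs <;> simp_all

theorem pyGetD_eq_getElem' (t : List Int) (i d : Int) (h1 : -(t.length : Int) ≤ i) (h2 : i < (t.length : Int))
    (hn : nidx t.length i < t.length) : PySem.List.pyGetD t i d = t[nidx t.length i] := by
  simp only [PySem.List.pyGetD, PySem.List.pyGet?, PySem.List.pyIdx?, nidx] at *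
  split_ifs at *
  · simp_all
  · have hlt : t.length - (-i).toNat < t.length := by omega
    simp_all

-- a read that produced 0 (≠ the default 2) was in range
theorem inRange_of_pyGetD_zero (t : List Int) (i : Int) (h : PySem.List.pyGetD t i 2 = 0) :
    -(t.length : Int) ≤ i ∧ i < (t.length : Int) := by
  by_contra hc
  have hn : PySem.List.pyGet? t i = none := by
    rw [PySem.List.pyGet?_eq_none_iff]
    intro hr
    exact hc ⟨hr.1, hr.2⟩
  rw [PySem.List.pyGetD_of_none t i 2 hn] at h
  omega

-- placing the block and taking it back restores the row: the guard certifies the four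
-- cells read 0 before the placement
theorem restore (t : List Int) (c : Int) (h : placeCond t c = true) :
    setBlock (setBlock t c 1) c 0 = t := by
  simp only [placeCond, Bool.and_eq_true, decide_eq_true_eq, beq_iff_eq] at h
  obtain ⟨⟨⟨⟨h3, h0⟩, hh1⟩, hh2⟩, hh3⟩ := h
  have r0 := inRange_of_pyGetD_zero t c h0
  have r1 := inRange_of_pyGetD_zero t (c+1) hh1
  have r2 := inRange_of_pyGetD_zero t (c+2) hh2
  have r3 := inRange_of_pyGetD_zero t (c+3) hh3
  have n0 := nidx_lt t.length c r0.1 r0.2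
  have n1 := nidx_lt t.length (c+1) r1.1 r1.2
  have n2 := nidx_lt t.length (c+2) r2.1 r2.2
  have n3 := nidx_lt t.length (c+3) r3.1 r3.2
  rw [pyGetD_eq_getElem' t c 2 r0.1 r0.2 n0] at h0
  rw [pyGetD_eq_getElem' t (c+1) 2 r1.1 r1.2 n1] at hh1
  rw [pyGetD_eq_getElem' t (c+2) 2 r2.1 r2.2 n2] at hh2
  rw [pyGetD_eq_getElem' t (c+3) 2 r3.1 r3.2 n3] at hh3
  have hset : ∀ (u : List Int) (j v : Int), u.length = t.length →
      -(t.length : Int) ≤ j → j < (t.length : Int) →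
      PySem.List.pySetD u j v = u.set (nidx t.length j) v := by
    intro u j v hu hj1 hj2
    rw [pySetD_eq_set u j v (by rw [hu]; exact hj1) (by rw [hu]; exact hj2), hu]
  simp only [setBlock]
  rw [hset t c 1 rfl r0.1 r0.2,
      hset _ (c+1) 1 (by simp) r1.1 r1.2,
      hset _ (c+2) 1 (by simp) r2.1 r2.2,
      hset _ (c+3) 1 (by simp) r3.1 r3.2]
  set X := (((t.set (nidx t.length c) 1).set (nidx t.length (c+1)) 1).set (nidx t.length (c+2)) 1).set (nidx t.length (c+3)) 1 with hX
  have hXlen : X.length = t.length := by simp [hX]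
  rw [hset X c 0 hXlen r0.1 r0.2,
      hset _ (c+1) 0 (by simp [hXlen]) r1.1 r1.2,
      hset _ (c+2) 0 (by simp [hXlen]) r2.1 r2.2,
      hset _ (c+3) 0 (by simp [hXlen]) r3.1 r3.2]
  apply List.ext_getElem
  · simp [hX]
  · intro k hk1 hk2
    simp only [List.getElem_set, hX]
    split_ifs <;> simp_all

-- the recursion leaves the tile row net-unchanged (Python restores its mutations)
theorem goA_fst : ∀ (fuel : Nat) (t : List Int) (p : List (List Int)) (c : Int), (goA fuel t p c).1 = t := by
  intro fuel
  induction fuel with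
  | zero => intro t p c; rfl
  | succ n ih =>
    intro t p c
    simp only [goA]
    by_cases h1 : (t.length : Int) ≤ c
    · rw [if_pos h1]
    · rw [if_neg h1]
      by_cases h2 : placeCond t c = true
      · rw [if_pos h2, ih, ih, restore t c h2]
      · rw [if_neg h2, ih]

-- ---- termination/fuel arithmetic for the stack loop ----
def stackM (s : List (List Int × Int)) : Nat :=
  (s.map (fun f => 2 ^ (((f.1.length : Int) - f.2).toNat + 1))).sum

theorem decPlace (len : Nat) (c : Int) (S : Nat) (h : c + 3 < (len : Int)) :
    2 ^ (((len : Int) - (c + 4)).toNat + 1) + (2 ^ (((len : Int) - (c + 1)).toNat + 1) + S) <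
      2 ^ (((len : Int) - c).toNat + 1) + S := by
  set k := ((len : Int) - c).toNat with hk
  have hk4 : 4 ≤ k := by omega
  have e1 : ((len : Int) - (c + 4)).toNat = k - 4 := by omega
  have e2 : ((len : Int) - (c + 1)).toNat = k - 1 := by omega
  rw [e1, e2]
  have h1 : 2 ^ (k - 4 + 1) < 2 ^ k := Nat.pow_lt_pow_right (by norm_num) (by omega)
  have h2 : 2 ^ (k - 1 + 1) = 2 ^ k := by congr 1; omega
  have h3 : 2 ^ (k + 1) = 2 ^ k + 2 ^ k := by rw [pow_succ]; omega
  omega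

theorem decSkip (len : Nat) (c : Int) (S : Nat) (h : c < (len : Int)) :
    2 ^ (((len : Int) - (c + 1)).toNat + 1) + S < 2 ^ (((len : Int) - c).toNat + 1) + S := by
  set k := ((len : Int) - c).toNat with hk
  have hk1 : 1 ≤ k := by omega
  have e2 : ((len : Int) - (c + 1)).toNat = k - 1 := by omega
  rw [e2]
  have h2 : 2 ^ (k - 1 + 1) = 2 ^ k := by congr 1; omega
  have h3 : 2 ^ k < 2 ^ (k + 1) := Nat.pow_lt_pow_right (by norm_num) (by omega)
  omega

theorem decPop (len : Nat) (c : Int) (S : Nat) : S < 2 ^ (((len : Int) - c).toNat + 1) + S := by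
  have := Nat.two_pow_pos (((len : Int) - c).toNat + 1)
  omega

theorem placeLen (t : List Int) (c : Int) (h : placeCond t c = true) : c + 3 < (t.length : Int) := by
  simp only [placeCond, Bool.and_eq_true, decide_eq_true_eq] at h
  exact h.1.1.1.1

theorem stackM_cons (tiles : List Int) (c : Int) (rest : List (List Int × Int)) :
    stackM ((tiles, c) :: rest) = 2 ^ (((tiles.length : Int) - c).toNat + 1) + stackM rest := by
  simp [stackM]

-- with enough fuel the loop's value does not depend on the fuel
theorem loopB_fuel_irrel : ∀ (f1 : Nat) (f2 : Nat) (s : List (List Int × Int)) (p : List (List Int)),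
    stackM s < f1 → stackM s < f2 → loopB f1 s p = loopB f2 s p := by
  intro f1
  induction f1 with
  | zero => intro f2 s p h1 h2; omega
  | succ n ih =>
    intro f2 s p h1 h2
    match s, f2 with
    | [], g => cases g <;> rfl
    | (tiles, c) :: rest, f2 + 1 =>
      rw [loopB, loopB]
      by_cases hc : c < (tiles.length : Int)
      · rw [if_pos hc, if_pos hc]
        by_cases hp : allZeroBlock tiles c = true
        · rw [if_pos hp, if_pos hp]
          apply ih
          · have := decPlace tiles.length c (stackM rest) (placeLen tiles c (by rwa [allZeroBlock_eq] at hp))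
            rw [stackM_cons] at h1
            rw [stackM_cons, stackM_cons]
            simp only [paintBlock_eq, setBlock, PySem.List.length_pySetD]
            omega
          · have := decPlace tiles.length c (stackM rest) (placeLen tiles c (by rwa [allZeroBlock_eq] at hp))
            rw [stackM_cons] at h2
            rw [stackM_cons, stackM_cons]
            simp only [paintBlock_eq, setBlock, PySem.List.length_pySetD]
            omega
        · rw [if_neg hp, if_neg hp]
          apply ih
          · have := decSkip tiles.length c (stackM rest) hc
            rw [stackM_cons] at h1; rw [stackM_cons]; omega
          · have := decSkip tiles.length c (stackM rest) hc
            rw [stackM_cons] at h2; rw [stackM_cons]; omega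
      · rw [if_neg hc, if_neg hc]
        apply ih
        · have := decPop tiles.length c (stackM rest)
          rw [stackM_cons] at h1; omega
        · have := decPop tiles.length c (stackM rest)
          rw [stackM_cons] at h2; omega

-- processing one stack frame of B is running A's whole recursion from that frame
theorem loop_frame : ∀ (fuelA : Nat) (tiles : List Int) (c : Int) (p : List (List Int)) (rest : List (List Int × Int)) (fuel : Nat),
    ((tiles.length : Int) - c).toNat < fuelA →
    stackM ((tiles, c) :: rest) < fuel →
    loopB fuel ((tiles, c) :: rest) p = loopB fuel rest (goA fuelA tiles p c).2 := by
  intro fuelA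
  induction fuelA with
  | zero => intro tiles c p rest fuel h hf; omega
  | succ n ih =>
    intro tiles c p rest fuel h hf
    obtain ⟨f, rfl⟩ : ∃ f, fuel = f + 1 := ⟨fuel - 1, by omega⟩
    rw [loopB]
    simp only [goA, hasBlueWindow_eq, allZeroBlock_eq, paintBlock_eq]
    by_cases h1 : c < (tiles.length : Int)
    · rw [if_pos h1, if_neg (by omega : ¬ (tiles.length : Int) ≤ c)]
      by_cases h2 : placeCond tiles c = true
      · rw [if_pos h2, if_pos h2]
        have h3 : c + 3 < (tiles.length : Int) := placeLen tiles c h2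
        have hdec := decPlace tiles.length c (stackM rest) h3
        have hlen : (setBlock tiles c 1).length = tiles.length := by
          simp only [setBlock, PySem.List.length_pySetD]
        have hM : stackM ((setBlock tiles c 1, c + 4) :: (tiles, c + 1) :: rest) < f := by
          rw [stackM_cons, stackM_cons, hlen]
          rw [stackM_cons] at hf
          omega
        rw [ih _ _ _ _ f (by rw [hlen]; omega) hM]
        have hM2 : stackM ((tiles, c + 1) :: rest) < f := by
          have := decSkip tiles.length c (stackM rest) h1
          rw [stackM_cons] at hf ⊢
          omega
        rw [ih _ _ _ _ f (by omega) hM2]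
        rw [goA_fst, restore tiles c h2]
        apply loopB_fuel_irrel
        · have := decPop tiles.length c (stackM rest)
          rw [stackM_cons] at hf; omega
        · have := decPop tiles.length c (stackM rest)
          rw [stackM_cons] at hf; omega
      · rw [if_neg h2, if_neg h2]
        have hM2 : stackM ((tiles, c + 1) :: rest) < f := by
          have := decSkip tiles.length c (stackM rest) h1
          rw [stackM_cons] at hf ⊢
          omega
        rw [ih _ _ _ _ f (by omega) hM2]
        apply loopB_fuel_irrel
        · have := decPop tiles.length c (stackM rest)
          rw [stackM_cons] at hf; omega
        · have := decPop tiles.length c (stackM rest)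
          rw [stackM_cons] at hf; omega
    · rw [if_neg h1, if_pos (by omega : (tiles.length : Int) ≤ c)]
      apply loopB_fuel_irrel
      · have := decPop tiles.length c (stackM rest)
        rw [stackM_cons] at hf; omega
      · have := decPop tiles.length c (stackM rest)
        rw [stackM_cons] at hf; omega

-- ===== VERDICT =====
theorem findBlueTiles_spec : Claim_equal_findBlueTiles := by
  intro g p c _ _
  unfold Spec_findBlueTiles findBlueTiles findBlueTiles_alt
  rw [loop_frame (((g.length : Int) - c).toNat + 1) g c p []
    (2 ^ ((((g.length : Int) - c).toNat) + 1) + 1) (by omega)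
    (by rw [stackM_cons]; simp [stackM])]
  cases h : (2 : Nat) ^ ((((g.length : Int) - c).toNat) + 1) + 1 <;> rfl
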